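-- pv_equiv track=rewrite | github.com/thierryxdp/TCC | problems/810/solution_242774.py | retira_pontuacao
-- ===== SOURCE A (Python) =====
-- def retira_pontuacao(frase):
--     NF = frase[:]
--     for simbolos in ["-",",",":",";","."]:
--         NF=str.replace(NF,simbolos," ")
--         for simbolos in [",",":",";","."]:
--             NF=str.replace(NF,simbolos," ")
--             for simbolos in [":",";","."]:
--                 NF=str.replace(NF,simbolos," ")
--                 for simbolos in [";","."]:
--                     NF=str.replace(NF,simbolos," ")
--                     for simbolos in ["."]:
--                         NF=str.replace(NF,simbolos," ")
--                         return NF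
-- ===== SOURCE B (Python) =====
-- def retira_pontuacao(frase):
--     punct = {'-', ',', ':', ';', '.'}
--     return ''.join(' ' if c in punct else c for c in frase)
-- ===== Notes on version B (the rewrite author's own statement) =====
-- stated objective: simpler
-- what changed: Replaces A's five sequential whole-string replace() scans (inside four redundant nested loops cut short by an early return) with a single character-level pass that maps each punctuation character to a space.
import Mathlib
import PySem

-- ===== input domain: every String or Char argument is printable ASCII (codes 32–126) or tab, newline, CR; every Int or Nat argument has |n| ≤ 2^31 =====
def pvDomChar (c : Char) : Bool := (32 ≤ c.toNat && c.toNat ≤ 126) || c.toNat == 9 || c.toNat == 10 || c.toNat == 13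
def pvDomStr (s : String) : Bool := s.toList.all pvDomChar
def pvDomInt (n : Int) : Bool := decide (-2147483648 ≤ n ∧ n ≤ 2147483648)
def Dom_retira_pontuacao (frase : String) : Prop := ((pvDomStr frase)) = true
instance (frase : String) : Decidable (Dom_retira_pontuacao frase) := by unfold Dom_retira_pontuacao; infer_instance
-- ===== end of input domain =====

-- B replaces A's five sequential whole-string replace() scans (under redundant nested
-- loops that an early return cuts short) with one character-level pass; objective: simpler.

-- ===== PORT A =====
-- A's nested for-loops each run exactly one iteration before the innermost 'return NF'
-- fires, so the executed trace is: NF = frase[:]; then replace '-' ',' ':' ';' '.' by ' '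
-- in that order; return.  The let-chain below is that trace, step for step.
def retira_pontuacao (frase : String) : String :=
  let NF := PySem.Str.slice frase none none        -- NF = frase[:]
  let NF := PySem.Str.replace NF "-" " "           -- outer loop, 1st iteration
  let NF := PySem.Str.replace NF "," " "           -- 2nd loop, 1st iteration
  let NF := PySem.Str.replace NF ":" " "           -- 3rd loop, 1st iteration
  let NF := PySem.Str.replace NF ";" " "           -- 4th loop, 1st iteration
  let NF := PySem.Str.replace NF "." " "           -- 5th loop, then 'return NF'
  NF

-- ===== PORT B =====
def retira_pontuacao_alt (frase : String) : String :=
  String.ofList (frase.toList.map (fun c => if c ∈ ['-', ',', ':', ';', '.'] then ' ' else c))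

-- ===== PRECONDITION & SPEC =====
def Spec_retira_pontuacao (frase : String) (out : String) : Prop := out = retira_pontuacao_alt frase
instance (frase : String) (out : String) : Decidable (Spec_retira_pontuacao frase out) := by unfold Spec_retira_pontuacao; infer_instance

-- ===== CLAIM (what is proved, stated in full; the proofs are below) =====
def Claim_equal_retira_pontuacao : Prop := ∀ (frase : String), Dom_retira_pontuacao frase → Spec_retira_pontuacao frase (retira_pontuacao frase)

-- ===== LEMMAS AND PROOFS =====

-- replacing a single character o by a single character n is a map over the characters
theorem replace_go_single (o n : Char) :
    ∀ (l : List Char) (fuel : Nat) (acc : List Char), l.length ≤ fuel →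
      PySem.Chars.replace.go [o] [n] fuel l acc
        = acc.reverse ++ l.map (fun c => if c = o then n else c) := by
  intro l
  induction l with
  | nil =>
    intro fuel acc _
    cases fuel <;> simp [PySem.Chars.replace.go]
  | cons c t ih =>
    intro fuel acc h
    cases fuel with
    | zero => simp at h
    | succ m =>
      simp only [PySem.Chars.replace.go]
      by_cases hc : c = o
      · subst hc
        simp only [List.isPrefixOf, BEq.rfl, Bool.true_and,
          if_true, List.length_cons, List.drop_succ_cons]
        simp only [List.length_nil, List.drop_zero, List.reverse_singleton, List.singleton_append]
        rw [ih m (n :: acc) (by simpa using h)]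
        simp
      · have : ([o].isPrefixOf (c :: t)) = false := by
          simp [List.isPrefixOf]
          exact fun he => (hc he.symm).elim
        rw [this]
        simp only [Bool.false_eq_true, if_false]
        rw [ih m (c :: acc) (by simpa using h)]
        simp [hc]

theorem replace_single (s : List Char) (o n : Char) :
    PySem.Chars.replace s [o] [n] = s.map (fun c => if c = o then n else c) := by
  rw [PySem.Chars.replace]
  simp only [List.isEmpty_cons, Bool.false_eq_true, if_false]
  simpa using replace_go_single o n s s.length [] (le_refl _)

-- ===== VERDICT (by name: the statement is the Claim_ definition above) =====
theorem retira_pontuacao_spec : Claim_equal_retira_pontuacao := by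
  intro frase _
  unfold Spec_retira_pontuacao retira_pontuacao retira_pontuacao_alt
  apply String.toList_inj.mp
  simp only [PySem.Str.toList_replace, PySem.Str.toList_slice, String.toList_ofList,
    PySem.Chars.slice_eq_listSlice, PySem.List.slice]
  simp only [show ("-" : String).toList = ['-'] from rfl, show ("," : String).toList = [','] from rfl,
    show (":" : String).toList = [':'] from rfl, show (";" : String).toList = [';'] from rfl,
    show ("." : String).toList = ['.'] from rfl, show (" " : String).toList = [' '] from rfl,
    replace_single, List.map_map, Nat.sub_zero, List.drop_zero, List.take_length]
  apply List.map_congr_left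
  intro c _
  simp only [Function.comp]
  split_ifs with h1 h2 h3 h4 h5 <;> simp_all
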